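-- pv_equiv track=rewrite | github.com/Firemain/softwareIatrogenie | backend/python_backend/functions.py | retirerChiffre
-- ===== SOURCE A (Python) =====
-- def retirerChiffre(string):
--     k=list(string)
--     i = 0
--     while k[i].isdigit()==False:
--         i+=1
--     k.remove(k[i])
--     u=''.join(k)
--     return u
-- ===== SOURCE B (Python) =====
-- def retirerChiffre(string):
--     idx = [i for i, c in enumerate(string) if c.isdigit()]
--     j = idx[0]
--     return string[:j] + string[j+1:]
-- ===== Notes on version B (the rewrite author's own statement) =====
-- stated objective: simpler
-- what changed: B builds the digit-index table with one comprehension and returns the two string slices around the first digit index, instead of A's list copy, explicit while-loop cursor, list.remove (an extra scan) and join.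
import Mathlib
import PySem

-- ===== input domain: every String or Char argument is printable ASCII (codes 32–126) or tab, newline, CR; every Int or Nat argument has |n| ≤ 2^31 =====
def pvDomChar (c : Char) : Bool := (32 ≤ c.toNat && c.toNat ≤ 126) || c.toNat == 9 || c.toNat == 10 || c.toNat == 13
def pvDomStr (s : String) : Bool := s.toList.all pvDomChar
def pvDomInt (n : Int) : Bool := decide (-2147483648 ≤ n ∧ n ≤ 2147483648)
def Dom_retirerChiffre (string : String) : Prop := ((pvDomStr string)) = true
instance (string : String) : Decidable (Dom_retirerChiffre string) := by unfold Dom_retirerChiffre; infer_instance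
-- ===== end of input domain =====

-- B replaces A's list() copy + while-loop cursor + list.remove scan + ''.join by a digit-index
-- table built in one comprehension and two slices around its first entry (objective: simpler).

-- ===== PORT A =====
-- the 'while k[i].isdigit()==False: i+=1' loop, scanning k from index i (rest = k dropped to i);
-- none = the loop runs off the end (IndexError in Python)
def pvFindA : List Char → Nat → Option Nat
  | [], _ => none
  | c :: cs, i => if PySem.Chars.isdigit c = false then pvFindA cs (i + 1) else some i

def retirerChiffre (string : String) : String :=
  let k := string.toList
  match pvFindA k 0 with
  | none => ""                                  -- IndexError (excluded by Pre_)
  | some i =>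
    match PySem.List.pyGet? k (i : Int) with    -- k[i]
    | none => ""
    | some c =>
      match PySem.List.remove? k c with         -- k.remove(k[i])
      | none => ""
      | some k' => String.ofList k'             -- ''.join(k)

-- ===== PORT B =====
def retirerChiffre_alt (string : String) : String :=
  let idx := (PySem.List.enumerate string.toList 0).filterMap
      (fun p => if PySem.Chars.isdigit p.2 then some p.1 else none)
  match PySem.List.pyGet? idx 0 with            -- idx[0]; none = IndexError (excluded by Pre_)
  | none => ""
  | some j =>
    String.ofList (PySem.List.slice string.toList none (some j)
                   ++ PySem.List.slice string.toList (some (j + 1)) none)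

-- ===== PRECONDITION & SPEC =====
-- A (and B) raise IndexError when the string contains no digit; Pre_ excludes exactly those inputs.
def Pre_retirerChiffre (string : String) : Prop :=
  string.toList.any PySem.Chars.isdigit = true
instance (string : String) : Decidable (Pre_retirerChiffre string) := by
  unfold Pre_retirerChiffre; infer_instance

def pvWitness_retirerChiffre : String := "a1"

def Spec_retirerChiffre (string : String) (out : String) : Prop := out = retirerChiffre_alt string
instance (string : String) (out : String) : Decidable (Spec_retirerChiffre string out) := by
  unfold Spec_retirerChiffre; infer_instance

-- ===== CLAIM (what is proved, stated in full; the proofs are below) =====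
def Claim_equal_retirerChiffre : Prop := ∀ (string : String), Dom_retirerChiffre string → Pre_retirerChiffre string → Spec_retirerChiffre string (retirerChiffre string)

-- ===== LEMMAS AND PROOFS =====

-- the list with the first digit removed: reference value both ports are proved equal to
def pvRef : List Char → List Char
  | [] => []
  | c :: cs => if PySem.Chars.isdigit c then cs else c :: pvRef cs

theorem pvFindA_shift (l : List Char) (s : Nat) :
    pvFindA l s = (pvFindA l 0).map (· + s) := by
  induction l generalizing s with
  | nil => simp [pvFindA]
  | cons c cs ih =>
    by_cases h : PySem.Chars.isdigit c
    · simp [pvFindA, h]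
    · simp [pvFindA, h, ih (s + 1), ih 1, Option.map_map]
      congr 1
      funext x
      omega

theorem pvA_main (l : List Char) (h : l.any PySem.Chars.isdigit = true) :
    ∃ (n : Nat) (d : Char), pvFindA l 0 = some n ∧ l[n]? = some d ∧
      PySem.Chars.isdigit d = true ∧ PySem.List.remove? l d = some (pvRef l) := by
  induction l with
  | nil => simp at h
  | cons c cs ih =>
    by_cases hc : PySem.Chars.isdigit c
    · exact ⟨0, c, by simp [pvFindA, hc], by simp, hc, by simp [pvRef, hc]⟩
    · have hcs : cs.any PySem.Chars.isdigit = true := by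
        simpa [hc] using h
      obtain ⟨n, d, h1, h2, h3, h4⟩ := ih hcs
      refine ⟨n + 1, d, ?_, by simpa using h2, h3, ?_⟩
      · simp [pvFindA, hc, pvFindA_shift cs 1, h1]
      · have hne : c ≠ d := fun he => by rw [he] at hc; exact hc h3
        rw [PySem.List.remove?_cons_of_ne _ hne, h4]
        simp [pvRef, hc]

theorem pvB_main (l : List Char) (h : l.any PySem.Chars.isdigit = true) :
    ∃ n : Nat,
      ((PySem.List.enumerate l 0).filterMap
        (fun p => if PySem.Chars.isdigit p.2 then some p.1 else none)).head? = some ((n : Nat) : Int) ∧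
      l.take n ++ l.drop (n + 1) = pvRef l := by
  induction l with
  | nil => simp at h
  | cons c cs ih =>
    by_cases hc : PySem.Chars.isdigit c
    · exact ⟨0, by simp [PySem.List.enumerate_cons, hc], by simp [pvRef, hc]⟩
    · have hcs : cs.any PySem.Chars.isdigit = true := by simpa [hc] using h
      obtain ⟨n, h1, h2⟩ := ih hcs
      refine ⟨n + 1, ?_, ?_⟩
      · have hsh : ∀ (m : List Char) (s : Int),
            (PySem.List.enumerate m s).filterMap
              (fun p => if PySem.Chars.isdigit p.2 then some p.1 else none)
            = ((PySem.List.enumerate m 0).filterMap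
              (fun p => if PySem.Chars.isdigit p.2 then some p.1 else none)).map (· + s) := by
          intro m
          induction m with
          | nil => intro s; simp [PySem.List.enumerate_nil]
          | cons x xs ihm =>
            intro s
            by_cases hx : PySem.Chars.isdigit x
            · simp [PySem.List.enumerate_cons, hx, ihm (s + 1), ihm 1,
                List.map_map]
              intro a y _ _
              ring
            · simp [PySem.List.enumerate_cons, hx, ihm (s + 1), ihm 1,
                List.map_map]
              intro a y _ _
              ring
        simp only [PySem.List.enumerate_cons, List.filterMap_cons, hc, Bool.false_eq_true,
          if_false, zero_add]
        rw [hsh cs 1, List.head?_map, h1]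
        simp only [Option.map_some, Option.some.injEq]
        push_cast
        ring
      · simp only [List.take_succ_cons, List.drop_succ_cons, List.cons_append, h2]
        simp [pvRef, hc]

theorem pvA_eq_ref (s : String) (h : s.toList.any PySem.Chars.isdigit = true) :
    retirerChiffre s = String.ofList (pvRef s.toList) := by
  obtain ⟨n, d, h1, h2, _, h4⟩ := pvA_main s.toList h
  unfold retirerChiffre
  simp only [h1]
  rw [PySem.List.pyGet?_natCast, h2]
  simp [h4]

theorem pvB_eq_ref (s : String) (h : s.toList.any PySem.Chars.isdigit = true) :
    retirerChiffre_alt s = String.ofList (pvRef s.toList) := by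
  obtain ⟨n, h1, h2⟩ := pvB_main s.toList h
  unfold retirerChiffre_alt
  have h0 : PySem.List.pyGet? ((PySem.List.enumerate s.toList 0).filterMap
      (fun p => if PySem.Chars.isdigit p.2 then some p.1 else none)) (0 : Int)
      = some ((n : Nat) : Int) := by
    rw [show (0 : Int) = ((0 : Nat) : Int) by norm_num, PySem.List.pyGet?_natCast]
    simpa [← List.head?_eq_getElem?] using h1
  simp only [h0]
  rw [PySem.List.slice_to_natCast,
    show ((n : Nat) : Int) + 1 = (((n + 1 : Nat) : Nat) : Int) by push_cast; ring,
    PySem.List.slice_from_natCast, h2]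

-- ===== VERDICT (by name: the statement is the Claim_ definition above) =====
theorem retirerChiffre_spec : Claim_equal_retirerChiffre := by
  intro s _ hpre
  unfold Spec_retirerChiffre
  rw [pvA_eq_ref s hpre, pvB_eq_ref s hpre]
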